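-- pv_equiv track=rewrite | github.com/ProtulSikder/CodeChef | rupsa and the game.py | rgame
-- ===== SOURCE A (Python) =====
-- mod = 10**9 + 7
--
-- def rgame(a, n):
--     s = 2 * a[0]
--     ans = 0
--     p = 1
--     for i in range(1, n + 1):
--         p = (2 * p) % mod
--         ans = (2 * ans + s * a[i]) % mod
--         s = (s + p * a[i]) % mod
--     return ans
-- ===== SOURCE B (Python) =====
-- mod = 10**9 + 7
--
-- def rgame(a, n):
--     # closed form: ans = (sum over i=1..m of 2^(m-i) * s_{i-1} * a[i]) mod p,
--     # where s_k = (2*a[0] + sum_{j=1..k} 2^j*a[j]) mod p; three flat passes.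
--     s0 = a[0]
--     m = n if n > 0 else 0
--     pow2 = [1]
--     for _ in range(m):
--         pow2.append(pow2[-1] * 2 % mod)
--     pref = [2 * s0 % mod]
--     for j in range(1, m + 1):
--         pref.append((pref[-1] + pow2[j] * a[j]) % mod)
--     total = 0
--     for i in range(1, m + 1):
--         total += pow2[m - i] * pref[i - 1] * a[i]
--     return total % mod
-- ===== Notes on version B (the rewrite author's own statement) =====
-- stated objective: alternative
-- what changed: Replaced A's single coupled recurrence (s, ans, p updated together each step) by the closed form ans = (sum of 2^(m-i)*s_{i-1}*a[i]) mod p, computed in three flat passes: a table of powers of two, a table of prefix values s, and a weighted sum reduced once at the end.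
import Mathlib
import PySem

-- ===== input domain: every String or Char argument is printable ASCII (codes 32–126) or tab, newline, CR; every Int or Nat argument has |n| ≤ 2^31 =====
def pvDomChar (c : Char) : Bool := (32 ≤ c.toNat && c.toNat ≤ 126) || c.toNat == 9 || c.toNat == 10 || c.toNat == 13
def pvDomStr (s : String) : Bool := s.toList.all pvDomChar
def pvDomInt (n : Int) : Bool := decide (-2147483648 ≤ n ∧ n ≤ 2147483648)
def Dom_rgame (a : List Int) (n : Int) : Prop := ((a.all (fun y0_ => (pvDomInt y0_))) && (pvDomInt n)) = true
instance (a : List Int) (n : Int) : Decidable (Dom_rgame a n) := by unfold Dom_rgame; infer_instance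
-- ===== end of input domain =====

-- B computes the same answer by the closed form ans = (Σ_{i=1..m} 2^(m-i)·s_{i-1}·a[i]) mod p,
-- in three flat passes (powers of two, prefix values s, weighted sum) instead of A's single
-- coupled recurrence; objective: alternative decomposition, same asymptotic cost.

def pvMod : Int := 1000000007

-- ===== PORT A =====
def rgame (a : List Int) (n : Int) : Int :=
  let st := (PySem.List.pyRange 1 (n + 1) 1).foldl
    (fun (st : Int × Int × Int) (i : Int) =>
      let p := PySem.Int.mod (2 * st.2.2) pvMod
      let ans := PySem.Int.mod (2 * st.2.1 + st.1 * PySem.List.pyGetD a i 0) pvMod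
      let s := PySem.Int.mod (st.1 + p * PySem.List.pyGetD a i 0) pvMod
      (s, ans, p))
    (2 * PySem.List.pyGetD a 0 0, 0, 1)
  st.2.1

-- ===== PORT B =====
def rgame_alt (a : List Int) (n : Int) : Int :=
  let s0 := PySem.List.pyGetD a 0 0
  let m := if n > 0 then n else 0
  let pow2 := (PySem.List.pyRange 0 m 1).foldl
    (fun (l : List Int) (_ : Int) =>
      l ++ [PySem.Int.mod (PySem.List.pyGetD l (-1) 0 * 2) pvMod]) [1]
  let pref := (PySem.List.pyRange 1 (m + 1) 1).foldl
    (fun (l : List Int) (j : Int) =>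
      l ++ [PySem.Int.mod (PySem.List.pyGetD l (-1) 0
              + PySem.List.pyGetD pow2 j 0 * PySem.List.pyGetD a j 0) pvMod])
    [PySem.Int.mod (2 * s0) pvMod]
  let total := (PySem.List.pyRange 1 (m + 1) 1).foldl
    (fun (t : Int) (i : Int) =>
      t + PySem.List.pyGetD pow2 (m - i) 0 * PySem.List.pyGetD pref (i - 1) 0
            * PySem.List.pyGetD a i 0) 0
  PySem.Int.mod total pvMod

-- ===== PRECONDITION & SPEC =====
-- Pre_ excludes exactly the inputs where the Python A raises IndexError: an empty a (a[0]),
-- or n ≥ len(a) (a[i] for some i in 1..n); B raises there too.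
def Pre_rgame (a : List Int) (n : Int) : Prop := a ≠ [] ∧ n < a.length
instance (a : List Int) (n : Int) : Decidable (Pre_rgame a n) := by unfold Pre_rgame; infer_instance
def pvWitness_rgame : List Int × Int := ([3, 1, 2], 2)

def Spec_rgame (a : List Int) (n : Int) (out : Int) : Prop := out = rgame_alt a n
instance (a : List Int) (n : Int) (out : Int) : Decidable (Spec_rgame a n out) := by unfold Spec_rgame; infer_instance

-- ===== CLAIM (what is proved, stated in full; the proofs are below) =====
def Claim_equal_rgame : Prop := ∀ (a : List Int) (n : Int), Dom_rgame a n → Pre_rgame a n → Spec_rgame a n (rgame a n)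

-- ===== LEMMAS AND PROOFS =====

-- a[k] as the ports read it
def aSeq (a : List Int) (k : Nat) : Int := PySem.List.pyGetD a (k : Int) 0

-- the exact (unreduced) prefix value s_k = 2*a[0] + Σ_{j=1..k} 2^j*a[j]
def sInt (a : List Int) : Nat → Int
  | 0 => 2 * aSeq a 0
  | k + 1 => sInt a k + 2 ^ (k + 1) * aSeq a (k + 1)

-- A's loop state (s, ans, p) after k iterations
def stA (a : List Int) : Nat → Int × Int × Int
  | 0 => (2 * aSeq a 0, 0, 1)
  | k + 1 =>
    let st := stA a k
    let p := (2 * st.2.2) % pvMod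
    let ans := (2 * st.2.1 + st.1 * aSeq a (k + 1)) % pvMod
    ((st.1 + p * aSeq a (k + 1)) % pvMod, ans, p)

-- the common target sum Σ_{k<m} 2^(m-1-k)·s_k·a[k+1]
def tSum (a : List Int) (m : Nat) : Int :=
  ((List.range m).map (fun k => 2 ^ (m - 1 - k) * sInt a k * aSeq a (k + 1))).sum

def pw (k : Nat) : Int := 2 ^ k % pvMod

theorem emod_modeq (x : Int) : x % pvMod ≡ x [ZMOD pvMod] :=
  Int.emod_emod_of_dvd x dvd_rfl

theorem foldA (a : List Int) (m : Nat) :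
    (PySem.List.pyRange 1 ((m : Int) + 1) 1).foldl
      (fun (st : Int × Int × Int) (i : Int) =>
        let p := PySem.Int.mod (2 * st.2.2) pvMod
        let ans := PySem.Int.mod (2 * st.2.1 + st.1 * PySem.List.pyGetD a i 0) pvMod
        let s := PySem.Int.mod (st.1 + p * PySem.List.pyGetD a i 0) pvMod
        (s, ans, p))
      (2 * PySem.List.pyGetD a 0 0, 0, 1) = stA a m := by
  induction m with
  | zero => simp [PySem.List.pyRange_one_eq_nil, stA, aSeq]
  | succ k ih =>
    have h1 : (((k + 1 : Nat) : Int)) + 1 = ((k : Int) + 1) + 1 := by push_cast; ring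
    rw [h1, PySem.List.pyRange_one_succ_right (by omega), List.foldl_append, ih]
    simp only [List.foldl_cons, List.foldl_nil, stA, aSeq,
      PySem.Int.mod_eq_emod_of_pos (show (0:Int) < pvMod by norm_num [pvMod])]
    push_cast
    ring_nf

theorem rgame_eq (a : List Int) (n : Int) : rgame a n = (stA a n.toNat).2.1 := by
  have hr : PySem.List.pyRange 1 (n + 1) 1 = PySem.List.pyRange 1 ((n.toNat : Int) + 1) 1 := by
    rcases (by omega : 0 ≤ n ∨ n < 0) with h | h
    · congr 1; omega
    · rw [PySem.List.pyRange_one_eq_nil (by omega), PySem.List.pyRange_one_eq_nil (by omega)]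
  unfold rgame
  rw [hr, foldA]

theorem tSum_succ (a : List Int) (k : Nat) :
    tSum a (k + 1) = 2 * tSum a k + sInt a k * aSeq a (k + 1) := by
  unfold tSum
  rw [List.range_succ, List.map_append, List.sum_append]
  have h : (List.range k).map (fun j => 2 ^ (k + 1 - 1 - j) * sInt a j * aSeq a (j + 1))
      = (List.range k).map (fun j => 2 * (2 ^ (k - 1 - j) * sInt a j * aSeq a (j + 1))) := by
    apply List.map_congr_left
    intro j hj
    rw [List.mem_range] at hj
    have : k + 1 - 1 - j = (k - 1 - j) + 1 := by omega
    rw [this, pow_succ]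
    ring
  rw [h, List.sum_map_mul_left]
  simp

theorem stA_spec (a : List Int) (m : Nat) :
    (stA a m).1 % pvMod = sInt a m % pvMod ∧ (stA a m).2.2 = 2 ^ m % pvMod ∧
      (stA a m).2.1 = tSum a m % pvMod := by
  induction m with
  | zero =>
    refine ⟨rfl, by norm_num [stA, pvMod], ?_⟩
    simp [stA, tSum]
  | succ k ih =>
    obtain ⟨hs, hp, hans⟩ := ih
    have hpM : (2 * (stA a k).2.2) % pvMod = 2 ^ (k + 1) % pvMod := by
      rw [hp]
      calc (2 * (2 ^ k % pvMod)) % pvMod = (2 * 2 ^ k) % pvMod :=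
            ((Int.ModEq.refl 2).mul (emod_modeq _))
        _ = 2 ^ (k + 1) % pvMod := by rw [pow_succ]; ring_nf
    refine ⟨?_, hpM, ?_⟩
    · show ((stA a k).1 + (2 * (stA a k).2.2) % pvMod * aSeq a (k + 1)) % pvMod % pvMod
          = sInt a (k + 1) % pvMod
      rw [Int.emod_emod_of_dvd _ dvd_rfl, hpM]
      calc ((stA a k).1 + 2 ^ (k + 1) % pvMod * aSeq a (k + 1)) % pvMod
            = (sInt a k + 2 ^ (k + 1) * aSeq a (k + 1)) % pvMod :=
              (Int.ModEq.add (show (stA a k).1 ≡ sInt a k [ZMOD pvMod] from hs)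
                ((emod_modeq _).mul_right _))
        _ = sInt a (k + 1) % pvMod := rfl
    · show (2 * (stA a k).2.1 + (stA a k).1 * aSeq a (k + 1)) % pvMod = tSum a (k + 1) % pvMod
      rw [hans, tSum_succ]
      exact Int.ModEq.add ((emod_modeq _).mul_left 2)
        ((show (stA a k).1 ≡ sInt a k [ZMOD pvMod] from hs).mul_right _)

theorem pw_succ (k : Nat) : PySem.Int.mod (pw k * 2) pvMod = pw (k + 1) := by
  rw [PySem.Int.mod_eq_emod_of_pos (show (0:Int) < pvMod by norm_num [pvMod])]
  unfold pw
  calc (2 ^ k % pvMod * 2) % pvMod = (2 ^ k * 2) % pvMod := ((emod_modeq _).mul_right 2)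
    _ = 2 ^ (k + 1) % pvMod := by rw [pow_succ]

theorem foldPow (m : Nat) :
    (PySem.List.pyRange 0 (m : Int) 1).foldl
      (fun (l : List Int) (_ : Int) =>
        l ++ [PySem.Int.mod (PySem.List.pyGetD l (-1) 0 * 2) pvMod]) [1]
    = (List.range (m + 1)).map pw := by
  induction m with
  | zero =>
    rw [PySem.List.pyRange_one_eq_nil (by omega)]
    norm_num [pw, pvMod]
  | succ k ih =>
    have h1 : ((k + 1 : Nat) : Int) = (k : Int) + 1 := by push_cast; ring
    rw [h1, PySem.List.pyRange_one_succ_right (by omega), List.foldl_append, ih]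
    simp only [List.foldl_cons, List.foldl_nil]
    rw [List.range_succ (n := k + 1), List.map_append, List.range_succ (n := k), List.map_append]
    simp [PySem.List.pyGetD_neg_one_append_singleton, pw_succ]

theorem pyGetD_map_range (f : Nat → Int) (n k : Nat) (h : k < n) :
    PySem.List.pyGetD ((List.range n).map f) ((k : Nat) : Int) 0 = f k := by
  rw [PySem.List.pyGetD_natCast]
  rw [List.getD_eq_getElem?_getD]
  simp [h]

theorem foldPref (a : List Int) (m t : Nat) (ht : t ≤ m) :
    (PySem.List.pyRange 1 ((t : Int) + 1) 1).foldl
      (fun (l : List Int) (j : Int) =>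
        l ++ [PySem.Int.mod (PySem.List.pyGetD l (-1) 0
                + PySem.List.pyGetD ((List.range (m + 1)).map pw) j 0 * PySem.List.pyGetD a j 0) pvMod])
      [PySem.Int.mod (2 * PySem.List.pyGetD a 0 0) pvMod]
    = (List.range (t + 1)).map (fun k => sInt a k % pvMod) := by
  induction t with
  | zero =>
    rw [PySem.List.pyRange_one_eq_nil (by omega)]
    simp [List.foldl_nil, sInt, aSeq,
      PySem.Int.mod_eq_emod_of_pos (show (0:Int) < pvMod by norm_num [pvMod])]
  | succ k ih =>
    have h1 : ((k + 1 : Nat) : Int) + 1 = ((k : Int) + 1) + 1 := by push_cast; ring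
    rw [h1, PySem.List.pyRange_one_succ_right (by omega), List.foldl_append,
      ih (by omega)]
    simp only [List.foldl_cons, List.foldl_nil]
    have hc : ((k : Int) + 1) = (((k + 1 : Nat)) : Int) := by push_cast; ring
    rw [List.range_succ (n := k + 1), List.map_append, List.range_succ (n := k), List.map_append]
    simp only [List.map_cons, List.map_nil]
    rw [PySem.List.pyGetD_neg_one_append_singleton, hc,
      pyGetD_map_range pw (m + 1) (k + 1) (by omega)]
    simp only [List.append_assoc, List.singleton_append, List.append_cancel_left_eq]
    have : PySem.Int.mod (sInt a k % pvMod + pw (k + 1) * PySem.List.pyGetD a ((k + 1 : Nat) : Int) 0) pvMod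
        = sInt a (k + 1) % pvMod := by
      rw [PySem.Int.mod_eq_emod_of_pos (show (0:Int) < pvMod by norm_num [pvMod])]
      calc (sInt a k % pvMod + pw (k + 1) * aSeq a (k + 1)) % pvMod
          = (sInt a k + 2 ^ (k + 1) * aSeq a (k + 1)) % pvMod :=
            Int.ModEq.add (emod_modeq _) ((emod_modeq _).mul_right _)
        _ = sInt a (k + 1) % pvMod := rfl
    rw [this]

theorem foldTot (a : List Int) (m t : Nat) (ht : t ≤ m) :
    (PySem.List.pyRange 1 ((t : Int) + 1) 1).foldl
      (fun (acc : Int) (i : Int) =>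
        acc + PySem.List.pyGetD ((List.range (m + 1)).map pw) ((m : Int) - i) 0
            * PySem.List.pyGetD ((List.range (m + 1)).map (fun k => sInt a k % pvMod)) (i - 1) 0
            * PySem.List.pyGetD a i 0) 0
    = ((List.range t).map (fun k => pw (m - 1 - k) * (sInt a k % pvMod) * aSeq a (k + 1))).sum := by
  induction t with
  | zero => rw [PySem.List.pyRange_one_eq_nil (by omega)]; simp
  | succ k ih =>
    have h1 : ((k + 1 : Nat) : Int) + 1 = ((k : Int) + 1) + 1 := by push_cast; ring
    rw [h1, PySem.List.pyRange_one_succ_right (by omega), List.foldl_append, ih (by omega)]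
    simp only [List.foldl_cons, List.foldl_nil]
    have e1 : (m : Int) - ((k : Int) + 1) = (((m - 1 - k : Nat)) : Int) := by omega
    have e2 : ((k : Int) + 1) - 1 = ((k : Nat) : Int) := by omega
    have e3 : ((k : Int) + 1) = (((k + 1 : Nat)) : Int) := by omega
    rw [e1, e2, pyGetD_map_range pw (m + 1) (m - 1 - k) (by omega),
      pyGetD_map_range _ (m + 1) k (by omega), List.range_succ, List.map_append,
      List.sum_append, e3]
    simp [aSeq]

theorem rgame_alt_eq (a : List Int) (n : Int) :
    rgame_alt a n =
      (((List.range n.toNat).map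
        (fun k => pw (n.toNat - 1 - k) * (sInt a k % pvMod) * aSeq a (k + 1))).sum) % pvMod := by
  have hm : (if n > 0 then n else 0) = ((n.toNat : Nat) : Int) := by
    split_ifs with h <;> omega
  unfold rgame_alt
  rw [hm]
  dsimp only
  rw [foldPow n.toNat, foldPref a n.toNat n.toNat le_rfl, foldTot a n.toNat n.toNat le_rfl,
    PySem.Int.mod_eq_emod_of_pos (show (0:Int) < pvMod by norm_num [pvMod])]

theorem sum_modeq (f g : Nat → Int) (m : Nat) (h : ∀ k, k < m → f k ≡ g k [ZMOD pvMod]) :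
    ((List.range m).map f).sum ≡ ((List.range m).map g).sum [ZMOD pvMod] := by
  induction m with
  | zero => rfl
  | succ k ih =>
    rw [List.range_succ, List.map_append, List.sum_append, List.map_append, List.sum_append]
    exact (ih (fun j hj => h j (by omega))).add (by simpa using h k (by omega))

-- ===== VERDICT (by name: the statement is the Claim_ definition above) =====
theorem rgame_spec : Claim_equal_rgame := by
  intro a n _ _
  unfold Spec_rgame
  rw [rgame_eq, (stA_spec a n.toNat).2.2, rgame_alt_eq]
  exact sum_modeq _ _ n.toNat (fun k hk =>
    Int.ModEq.mul (Int.ModEq.mul (emod_modeq _).symm (emod_modeq _).symm) (Int.ModEq.refl _))
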